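-- pv_equiv track=rewrite | github.com/YiJia-Zhu/Steer-Memory | baseline_steer/DEER/utils/answer_extractor.py | _fix_fracs
-- ===== SOURCE A (Python) =====
-- def _fix_fracs(string: str) -> str:
--     substrs = string.split("\\frac")
--     new_str = substrs[0]
--     if len(substrs) > 1:
--         substrs = substrs[1:]
--         for substr in substrs:
--             new_str += "\\frac"
--             if len(substr) > 0 and substr[0] == "{":
--                 new_str += substr
--             else:
--                 if len(substr) < 2:
--                     return string
--                 a = substr[0]
--                 b = substr[1]
--                 if b != "{":
--                     post_substr = substr[2:]
--                     new_str += "{" + a + "}{" + b + "}" + post_substr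
--                 else:
--                     post_substr = substr[2:]
--                     new_str += "{" + a + "}" + b + post_substr
--     return new_str
-- ===== SOURCE B (Python) =====
-- def _fix_fracs(string: str) -> str:
--     # Single positional scan: copy chars, patch the two characters after each bare \frac.
--     n = len(string)
--     out = []
--     i = 0
--     while i < n:
--         if string.startswith("\\frac", i):
--             out.append("\\frac")
--             i += 5
--             if i < n and string[i] == "{":
--                 out.append("{")
--                 i += 1
--                 continue
--             # need two chars a,b not cut by the next \frac or end of string
--             if i + 1 >= n or string.startswith("\\frac", i) or string.startswith("\\frac", i + 1):
--                 return string
--             a, b = string[i], string[i + 1]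
--             if b != "{":
--                 out.append("{" + a + "}{" + b + "}")
--             else:
--                 out.append("{" + a + "}{")
--             i += 2
--         else:
--             out.append(string[i])
--             i += 1
--     return "".join(out)
-- ===== Notes on version B (the rewrite author's own statement) =====
-- stated objective: alternative
-- what changed: Replaces split-on-'\frac'-then-rebuild-pieces with a single left-to-right positional scan that copies characters and patches the two characters following each bare '\frac' in place.
import Mathlib
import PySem

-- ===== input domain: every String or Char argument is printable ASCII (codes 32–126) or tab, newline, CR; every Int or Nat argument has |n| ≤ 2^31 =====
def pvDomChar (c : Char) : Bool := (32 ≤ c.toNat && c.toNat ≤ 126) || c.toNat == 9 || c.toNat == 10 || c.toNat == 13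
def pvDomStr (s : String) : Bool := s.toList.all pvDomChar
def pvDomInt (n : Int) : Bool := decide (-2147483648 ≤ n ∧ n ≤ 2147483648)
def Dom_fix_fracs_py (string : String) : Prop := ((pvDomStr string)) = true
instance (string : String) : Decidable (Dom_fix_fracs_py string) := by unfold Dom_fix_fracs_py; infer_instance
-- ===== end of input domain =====

-- B replaces split-then-rebuild with a single positional scan over the characters (alternative decomposition, same result).

def pvFracSep : List Char := ['\\', 'f', 'r', 'a', 'c']

-- ===== PORT A =====
-- the for-loop over the split pieces, with Python's early `return string` carried as `orig`
def pvLoopA (orig : List Char) : List (List Char) → List Char → List Char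
  | [], acc => acc
  | sub :: rest, acc =>
    let acc2 := acc ++ pvFracSep
    if sub.length > 0 && (PySem.List.pyGet? sub 0 == some '{') then
      pvLoopA orig rest (acc2 ++ sub)
    else if sub.length < 2 then orig
    else
      let a := (PySem.List.pyGet? sub 0).getD ' '
      let b := (PySem.List.pyGet? sub 1).getD ' '
      if b ≠ '{' then
        pvLoopA orig rest (acc2 ++ ['{', a, '}', '{', b, '}'] ++ PySem.List.slice sub (some 2) none)
      else
        pvLoopA orig rest (acc2 ++ ['{', a, '}'] ++ [b] ++ PySem.List.slice sub (some 2) none)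

def fix_fracs_py (string : String) : String :=
  let substrs := PySem.Chars.splitOn string.toList pvFracSep
  let new_str := (PySem.List.pyGet? substrs 0).getD []
  if substrs.length > 1 then
    String.mk (pvLoopA string.toList (PySem.List.slice substrs (some 1) none) new_str)
  else String.mk new_str

-- ===== PORT B =====
-- single scan: copy chars; after each literal `\frac` patch the next two characters
def pvLoopB (orig : List Char) (s : List Char) (out : List Char) : List Char :=
  match s with
  | [] => out
  | c :: rest =>
    if pvFracSep.isPrefixOf (c :: rest) then
      let s' := (c :: rest).drop 5
      let out2 := out ++ pvFracSep
      if PySem.List.pyGet? s' 0 == some '{' then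
        pvLoopB orig (s'.drop 1) (out2 ++ ['{'])
      else if s'.length < 2 || pvFracSep.isPrefixOf s' || pvFracSep.isPrefixOf (s'.drop 1) then
        orig
      else
        let a := (PySem.List.pyGet? s' 0).getD ' '
        let b := (PySem.List.pyGet? s' 1).getD ' '
        if b ≠ '{' then
          pvLoopB orig (s'.drop 2) (out2 ++ ['{', a, '}', '{', b, '}'])
        else
          pvLoopB orig (s'.drop 2) (out2 ++ ['{', a, '}', '{'])
    else
      pvLoopB orig rest (out ++ [c])
termination_by s.length
decreasing_by all_goals first | (simp; omega) | simp

def fix_fracs_py_alt (string : String) : String :=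
  String.mk (pvLoopB string.toList string.toList [])

-- ===== PRECONDITION & SPEC =====
def Spec_fix_fracs_py (string : String) (out : String) : Prop := out = fix_fracs_py_alt string
instance (string : String) (out : String) : Decidable (Spec_fix_fracs_py string out) := by unfold Spec_fix_fracs_py; infer_instance

-- ===== CLAIM (what is proved, stated in full; the proofs are below) =====
def Claim_equal_fix_fracs_py : Prop := ∀ (string : String), Dom_fix_fracs_py string → Spec_fix_fracs_py string (fix_fracs_py string)

-- ===== LEMMAS AND PROOFS =====

-- a direct recursive characterisation of Python's str.split on the separator "\frac"
def pvSplitR (s : List Char) : List (List Char) :=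
  match s with
  | [] => [[]]
  | c :: rest =>
    if pvFracSep.isPrefixOf (c :: rest) then
      [] :: pvSplitR ((c :: rest).drop 5)
    else
      (pvSplitR rest).modifyHead (c :: ·)
termination_by s.length
decreasing_by all_goals first | (simp; omega) | simp

theorem pvModifyHead_id {α : Type} (l : List α) : List.modifyHead (fun x => x) l = l := by
  cases l <;> simp

theorem pvSplitR_ne_nil (s : List Char) : pvSplitR s ≠ [] := by
  cases s with
  | nil => simp [pvSplitR]
  | cons c rest =>
    rw [pvSplitR.eq_def]
    dsimp only
    split_ifs with h
    · simp
    · cases hh : pvSplitR rest with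
      | nil => exact absurd hh (pvSplitR_ne_nil rest)
      | cons x xs => simp

theorem pvGo_eq (fuel : Nat) : ∀ (s cur : List Char) (acc : List (List Char)), s.length < fuel →
    PySem.Chars.splitOn.go pvFracSep fuel s cur acc
      = acc.reverse ++ (pvSplitR s).modifyHead (cur.reverse ++ ·) := by
  induction fuel with
  | zero => intro s cur acc h; omega
  | succ n ih =>
    intro s cur acc h
    cases s with
    | nil =>
      rw [PySem.Chars.splitOn.go, pvSplitR.eq_def]
      simp
      omega
    | cons c rest =>
      rw [PySem.Chars.splitOn.go, pvSplitR.eq_def]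
      by_cases hp : pvFracSep.isPrefixOf (c :: rest)
      · have h5 : pvFracSep.length ≤ (c :: rest).length :=
          (List.isPrefixOf_iff_prefix.mp hp).length_le
        simp only [hp, if_true]
        rw [ih _ _ _ (by simp [pvFracSep] at h5 ⊢; simp at h; omega)]
        simp only [pvFracSep, List.reverse_cons, List.reverse_nil, List.nil_append, List.drop_drop]
        simp [pvModifyHead_id]
      · simp only [hp, if_false, Bool.false_eq_true]
        rw [ih _ _ _ (by simp at h ⊢; omega)]
        rw [List.modifyHead_modifyHead]
        have hf : ((fun x => cur.reverse ++ x) ∘ fun x => c :: x)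
            = (fun x => (c :: cur).reverse ++ x) := by
          funext x; simp
        rw [hf]

theorem pvSplitOn_eq (s : List Char) : PySem.Chars.splitOn s pvFracSep = pvSplitR s := by
  rw [PySem.Chars.splitOn.eq_1, pvGo_eq _ _ _ _ (by omega)]
  simp [pvModifyHead_id]

theorem pvGet0 (c : Char) (t : List Char) : PySem.List.pyGet? (c :: t) 0 = some c := by
  simp [PySem.List.pyGet?, PySem.List.pyIdx?]

theorem pvGet1 (c d : Char) (t : List Char) : PySem.List.pyGet? (c :: d :: t) 1 = some d := by
  simp [PySem.List.pyGet?, PySem.List.pyIdx?]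

theorem pvNotPrefixOfNe {c : Char} (hc : c ≠ '\\') (t : List Char) :
    pvFracSep.isPrefixOf (c :: t) = false := by
  have hb : ('\\' == c) = false := by
    simp only [beq_eq_false_iff_ne, ne_eq]
    exact fun h => hc h.symm
  simp [pvFracSep, List.isPrefixOf, hb]

theorem pvMain (n : Nat) : ∀ (s : List Char), s.length ≤ n → ∀ (out orig : List Char),
    pvLoopB orig s out
      = (match pvSplitR s with
         | [] => out
         | first :: rest => pvLoopA orig rest (out ++ first)) := by
  induction n with
  | zero =>
    intro s hs out orig
    have hnil : s = [] := List.eq_nil_of_length_eq_zero (by omega)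
    subst hnil
    simp [pvLoopB, pvSplitR, pvLoopA]
  | succ n ih =>
    intro s hs out orig
    cases s with
    | nil => simp [pvLoopB, pvSplitR, pvLoopA]
    | cons c rest =>
      rw [pvLoopB.eq_def]
      dsimp only
      rw [pvSplitR.eq_def]
      dsimp only
      by_cases hp : pvFracSep.isPrefixOf (c :: rest)
      · simp only [hp, if_true]
        simp only [show List.drop 5 (c :: rest) = List.drop 4 rest from rfl,
          show List.drop 1 (List.drop 4 rest) = (List.drop 4 rest).drop 1 from rfl]
        have hlen5 : 5 ≤ (c :: rest).length := by
          simpa [pvFracSep] using (List.isPrefixOf_iff_prefix.mp hp).length_le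
        have hrest : rest.length ≤ n := by simp at hs; omega
        have hdlen : (List.drop 4 rest).length = rest.length - 4 := by simp
        -- goal now relates the scan on s' = drop 4 rest with pvLoopA on pvSplitR s'
        show _ = pvLoopA orig (pvSplitR (List.drop 4 rest)) (out ++ [])
        by_cases hbrace : PySem.List.pyGet? (List.drop 4 rest) 0 == some '{'
        · -- s' starts with '{' : copy it and keep scanning
          obtain ⟨t, hs'⟩ : ∃ t, List.drop 4 rest = '{' :: t := by
            cases hd : List.drop 4 rest with
            | nil => rw [hd] at hbrace; simp [PySem.List.pyGet?, PySem.List.pyIdx?] at hbrace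
            | cons x t =>
              rw [hd, pvGet0] at hbrace
              exact ⟨t, by simp at hbrace; rw [hbrace]⟩
          rw [hs']
          rw [if_pos (by rw [pvGet0]; simp)]
          rw [pvSplitR.eq_def]
          dsimp only
          rw [pvNotPrefixOfNe (by decide) t]
          simp only [Bool.false_eq_true, if_false]
          cases hu : pvSplitR t with
          | nil => exact absurd hu (pvSplitR_ne_nil t)
          | cons u r =>
            simp only [show List.drop 1 ('{' :: t) = t from rfl]
            rw [ih t (by
              have := congrArg List.length hs'
              simp at this hs
              omega) _ orig]
            rw [hu]
            rw [pvLoopA.eq_def]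
            dsimp only
            simp [pvGet0, pvFracSep]
        · rw [if_neg (by simpa using hbrace)]
          by_cases hbail :
              ((List.drop 4 rest).length < 2 || pvFracSep.isPrefixOf (List.drop 4 rest)
                || pvFracSep.isPrefixOf ((List.drop 4 rest).drop 1)) = true
          · -- bail-out: the split piece has fewer than two characters; A returns `orig` too
            rw [if_pos hbail]
            by_cases hp2 : pvFracSep.isPrefixOf (List.drop 4 rest)
            · rw [pvSplitR.eq_def]
              cases hd : List.drop 4 rest with
              | nil => simp [pvLoopA]
              | cons x t =>
                rw [hd] at hp2
                dsimp only
                rw [if_pos hp2]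
                simp [pvLoopA]
            · generalize hd : List.drop 4 rest = s2 at hbrace hbail hp2 ⊢
              cases s2 with
              | nil => simp [pvSplitR, pvLoopA]
              | cons x t =>
                have hx : x ≠ '{' := by
                  rw [pvGet0] at hbrace; simpa using hbrace
                cases t with
                | nil =>
                  rw [pvSplitR.eq_def]
                  dsimp only
                  rw [if_neg hp2]
                  simp [pvSplitR, pvLoopA, pvGet0, hx]
                | cons y t2 =>
                  have hp3 : pvFracSep.isPrefixOf (y :: t2) = true := by
                    by_contra hc
                    simp only [Bool.not_eq_true] at hc
                    simp [hp2, hc] at hbail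
                  rw [pvSplitR.eq_def]
                  dsimp only
                  rw [if_neg hp2, pvSplitR.eq_def]
                  dsimp only
                  rw [if_pos hp3]
                  simp [pvLoopA, pvGet0, hx]
          · -- main case: two plain characters a, b follow
            rw [if_neg hbail]
            have hp2 : ¬ pvFracSep.isPrefixOf (List.drop 4 rest) = true :=
              fun h => hbail (by rw [h]; simp)
            have hp3 : ¬ pvFracSep.isPrefixOf (List.drop 1 (List.drop 4 rest)) = true :=
              fun h => hbail (by rw [h]; simp)
            have h2 : 2 ≤ (List.drop 4 rest).length := by
              by_contra hlt
              exact hbail (by rw [decide_eq_true (by omega : (List.drop 4 rest).length < 2)]; simp)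
            obtain ⟨a, ta, hda⟩ := List.exists_cons_of_ne_nil
              (show List.drop 4 rest ≠ [] by intro hnil; rw [hnil] at h2; simp at h2)
            obtain ⟨b, t2, hdb⟩ := List.exists_cons_of_ne_nil
              (show ta ≠ [] by
                intro hnil
                rw [hda, hnil] at h2
                simp at h2)
            have hd : List.drop 4 rest = a :: b :: t2 := by rw [hda, hdb]
            rw [hd] at hp2 hp3 hbrace ⊢
            have ha : a ≠ '{' := by rw [pvGet0] at hbrace; simpa using hbrace
            simp only [List.drop_succ_cons, List.drop_zero] at hp3
            rw [pvSplitR.eq_def]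
            dsimp only
            rw [if_neg hp2, pvSplitR.eq_def]
            dsimp only
            rw [if_neg hp3]
            cases hu : pvSplitR t2 with
            | nil => exact absurd hu (pvSplitR_ne_nil t2)
            | cons u r =>
              have ht2 : t2.length ≤ n := by
                have := congrArg List.length hd
                simp at this ⊢
                simp at hs
                omega
              rw [pvGet0, pvGet1]
              simp only [show List.drop 2 (a :: b :: t2) = t2 from rfl]
              by_cases hb : b = '{'
              · subst hb
                rw [if_neg (fun hcon => hcon rfl)]
                rw [ih t2 ht2 _ orig, hu]
                rw [pvLoopA.eq_def]
                dsimp only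
                have hslice : PySem.List.slice (a :: '{' :: u) (some 2) none = u := by
                  rw [PySem.List.slice_from _ (by norm_num)]
                  simp
                simp [pvGet0, pvGet1, ha, hslice]
              · rw [if_pos (by simpa using hb)]
                rw [ih t2 ht2 _ orig, hu]
                rw [pvLoopA.eq_def]
                dsimp only
                have hslice : PySem.List.slice (a :: b :: u) (some 2) none = u := by
                  rw [PySem.List.slice_from _ (by norm_num)]
                  simp
                simp [pvGet0, pvGet1, ha, hb, hslice]
      · simp only [hp, if_false, Bool.false_eq_true]
        cases hu : pvSplitR rest with
        | nil => exact absurd hu (pvSplitR_ne_nil rest)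
        | cons u r =>
          rw [ih rest (by simp at hs; omega) _ orig, hu]
          simp

theorem fix_fracs_eq (string : String) : fix_fracs_py string = fix_fracs_py_alt string := by
  unfold fix_fracs_py fix_fracs_py_alt
  rw [pvSplitOn_eq]
  cases hu : pvSplitR string.toList with
  | nil => exact absurd hu (pvSplitR_ne_nil _)
  | cons u r =>
    rw [pvMain string.toList.length string.toList le_rfl [] string.toList, hu]
    have hslice : PySem.List.slice (u :: r) (some 1) none = r := by
      rw [PySem.List.slice_from _ (by norm_num)]
      simp
    cases r with
    | nil => simp [pvGet0, pvLoopA]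
    | cons v r2 => simp [pvGet0, hslice]
-- ===== VERDICT (by name: the statement is the Claim_ definition above) =====
theorem fix_fracs_py_spec : Claim_equal_fix_fracs_py := by
  intro s _
  unfold Spec_fix_fracs_py
  exact fix_fracs_eq s
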